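-- pv_equiv track=rewrite | github.com/aryalsushant/dsa | tip101-3a/7 - Recursion/session2/count_rotations.py | count_rotations
-- ===== SOURCE A (Python) =====
-- def count_rotations(nums):
--
--     #this is the same as finding the index of the smallest element
--     left = 0
--     right = len(nums)-1
--     while left<right:
--         middle = (left+right)//2
--
--         if nums[middle]>nums[right]:
--             left = middle+1
--         else:
--             right = middle
--
--     return left
-- ===== SOURCE B (Python) =====
-- def count_rotations(nums):
--     def helper(left, right):
--         if left >= right:
--             return left
--         middle = (left + right) // 2
--         if nums[middle] > nums[right]:
--             return helper(middle + 1, right)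
--         return helper(left, middle)
--     return helper(0, len(nums) - 1)
-- ===== Notes on version B (the rewrite author's own statement) =====
-- stated objective: alternative
-- what changed: The iterative while-loop binary search is re-decomposed as a recursive helper(left, right) with base case left >= right, keeping the exact split logic so all corner cases (empty, unrotated, duplicates) match.
import Mathlib
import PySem

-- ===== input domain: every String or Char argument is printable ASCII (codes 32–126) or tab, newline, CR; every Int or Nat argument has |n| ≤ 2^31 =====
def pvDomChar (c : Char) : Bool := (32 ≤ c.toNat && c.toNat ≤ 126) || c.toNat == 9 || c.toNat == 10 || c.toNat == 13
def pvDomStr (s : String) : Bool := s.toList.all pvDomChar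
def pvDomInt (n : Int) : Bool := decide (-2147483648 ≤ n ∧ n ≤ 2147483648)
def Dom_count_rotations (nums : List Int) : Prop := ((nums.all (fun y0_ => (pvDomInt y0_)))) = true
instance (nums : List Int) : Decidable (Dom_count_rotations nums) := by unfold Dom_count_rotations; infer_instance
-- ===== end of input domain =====

-- B re-decomposes A's iterative binary search as a recursive helper with the same split logic (alternative decomposition; same cost).

-- ===== PORT A =====
-- A's while-loop, ported with fuel (fuel nums.length + 1 always suffices: each step shrinks right - left)
def count_rotations_loop (nums : List Int) : Nat → Int → Int → Int
  | 0, left, _ => left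
  | fuel + 1, left, right =>
    if left < right then
      let middle := PySem.Int.floordiv (left + right) 2
      if PySem.List.pyGetD nums middle 0 > PySem.List.pyGetD nums right 0 then
        count_rotations_loop nums fuel (middle + 1) right
      else
        count_rotations_loop nums fuel left middle
    else left

def count_rotations (nums : List Int) : Int :=
  count_rotations_loop nums (nums.length + 1) 0 (PySem.List.len nums - 1)

-- ===== PORT B =====
def count_rotations_helper (nums : List Int) (left right : Int) : Int :=
  if left ≥ right then left
  else
    let middle := PySem.Int.floordiv (left + right) 2
    if PySem.List.pyGetD nums middle 0 > PySem.List.pyGetD nums right 0 then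
      count_rotations_helper nums (middle + 1) right
    else
      count_rotations_helper nums left middle
termination_by (right - left).toNat
decreasing_by
  all_goals
    rw [PySem.Int.floordiv_eq_ediv_of_pos (by norm_num)]
    omega

def count_rotations_alt (nums : List Int) : Int :=
  count_rotations_helper nums 0 (PySem.List.len nums - 1)

-- ===== PRECONDITION & SPEC =====
def Spec_count_rotations (nums : List Int) (out : Int) : Prop := out = count_rotations_alt nums
instance (nums : List Int) (out : Int) : Decidable (Spec_count_rotations nums out) := by unfold Spec_count_rotations; infer_instance

-- ===== CLAIM (what is proved, stated in full; the proofs are below) =====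
def Claim_equal_count_rotations : Prop := ∀ (nums : List Int), Dom_count_rotations nums → Spec_count_rotations nums (count_rotations nums)

-- ===== LEMMAS AND PROOFS =====
theorem count_rotations_loop_eq_helper (nums : List Int) (fuel : Nat) (left right : Int)
    (hf : (right - left).toNat < fuel) :
    count_rotations_loop nums fuel left right = count_rotations_helper nums left right := by
  induction fuel generalizing left right with
  | zero => omega
  | succ f ih =>
    rw [count_rotations_loop, count_rotations_helper]
    by_cases h : left < right
    · have hmid : left ≤ PySem.Int.floordiv (left + right) 2 ∧
          PySem.Int.floordiv (left + right) 2 ≤ right :=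
        PySem.Int.floordiv_two_mid_bounds (by omega)
      have hlt : PySem.Int.floordiv (left + right) 2 < right := by
        rw [PySem.Int.floordiv_eq_ediv_of_pos (by norm_num)]; omega
      simp only [h, if_true, show ¬ left ≥ right by omega, if_false]
      split
      · exact ih _ _ (by omega)
      · exact ih _ _ (by omega)
    · simp only [h, if_false, show left ≥ right by omega, if_true]

-- ===== VERDICT (by name: the statement is the Claim_ definition above) =====
theorem count_rotations_spec : Claim_equal_count_rotations := by
  intro nums _
  unfold Spec_count_rotations count_rotations count_rotations_alt
  exact count_rotations_loop_eq_helper nums _ 0 _ (by simp only [PySem.List.len_eq]; omega)
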